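-- pv_equiv track=rewrite | github.com/dayoadeyemi/algorithms | PE516.py | boundedProducts
-- ===== SOURCE A (Python) =====
-- def boundedProducts(lst, L):
--     prods = [1]
--     for l in lst:
--         new = []
--         for k in l:
--             for m in prods:
--                 if k*m <= L:
--                     new.append(k*m)
--                 else:
--                     break
--         prods += new
--         prods.sort()
--     return prods
-- ===== SOURCE B (Python) =====
-- def _merge(a, b):
--     out = []
--     i = j = 0
--     la, lb = len(a), len(b)
--     while i < la and j < lb:
--         if a[i] <= b[j]:
--             out.append(a[i]); i += 1
--         else:
--             out.append(b[j]); j += 1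
--     out.extend(a[i:])
--     out.extend(b[j:])
--     return out
--
-- def boundedProducts(lst, L):
--     prods = [1]
--     for l in lst:
--         acc = prods
--         for k in l:
--             run = []
--             for m in prods:
--                 p = k * m
--                 if p > L:
--                     break
--                 run.append(p)
--             if k < 0:
--                 run.reverse()
--             acc = _merge(acc, run)
--         prods = acc
--     return prods
-- ===== Notes on version B (the rewrite author's own statement) =====
-- stated objective: alternative
-- what changed: Instead of appending all new products and re-sorting the whole accumulator with list.sort() after every input list, B emits each per-element run already sorted (reversing it when the multiplier is negative) and combines runs into the sorted accumulator with a two-pointer merge, so no sort is ever called.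
import Mathlib
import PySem

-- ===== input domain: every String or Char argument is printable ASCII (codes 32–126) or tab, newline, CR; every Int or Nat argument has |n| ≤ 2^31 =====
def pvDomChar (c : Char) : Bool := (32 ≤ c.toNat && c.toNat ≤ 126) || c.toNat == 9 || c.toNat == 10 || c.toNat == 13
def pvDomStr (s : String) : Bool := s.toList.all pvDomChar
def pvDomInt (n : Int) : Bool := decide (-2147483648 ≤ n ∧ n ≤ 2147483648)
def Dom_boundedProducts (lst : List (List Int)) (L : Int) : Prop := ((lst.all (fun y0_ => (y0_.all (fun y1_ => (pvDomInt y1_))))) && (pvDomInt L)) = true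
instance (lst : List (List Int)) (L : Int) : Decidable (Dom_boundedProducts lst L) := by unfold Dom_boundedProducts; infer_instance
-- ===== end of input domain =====

-- B replaces A's full re-sort of the product list after every input list with sign-normalised
-- sorted runs merged two-pointer style into the (already sorted) accumulator — an alternative,
-- merge-based formulation; return values are proved identical on all inputs.

-- ===== PORT A =====
-- inner 'for m in prods: if k*m <= L: new.append(k*m) else: break'
def pvInnerA (L k : Int) : List Int → List Int
  | [] => []
  | m :: ms => if k * m ≤ L then k * m :: pvInnerA L k ms else []

-- one iteration of A's outer loop: build new, append, sort
def pvStepA (L : Int) (prods : List Int) (l : List Int) : List Int :=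
  PySem.List.sorted (prods ++ l.foldl (fun new k => new ++ pvInnerA L k prods) []) (fun x => x) false

def boundedProducts (lst : List (List Int)) (L : Int) : List Int :=
  lst.foldl (pvStepA L) [1]

-- ===== PORT B =====
-- two-pointer merge of two lists (B's _merge)
def pvMerge : List Int → List Int → List Int
  | [], b => b
  | a, [] => a
  | x :: xs, y :: ys =>
    if x ≤ y then x :: pvMerge xs (y :: ys) else y :: pvMerge (x :: xs) ys

-- B's per-k run: products while ≤ L, reversed when k < 0
def pvRunB (L k : Int) (prods : List Int) : List Int :=
  let run := (prods.takeWhile (fun m => decide (¬ k * m > L))).map (fun m => k * m)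
  if k < 0 then run.reverse else run

-- one iteration of B's outer loop: merge each run into the accumulator
def pvStepB (L : Int) (prods : List Int) (l : List Int) : List Int :=
  l.foldl (fun acc k => pvMerge acc (pvRunB L k prods)) prods

def boundedProducts_alt (lst : List (List Int)) (L : Int) : List Int :=
  lst.foldl (pvStepB L) [1]

-- ===== PRECONDITION & SPEC =====
def Spec_boundedProducts (lst : List (List Int)) (L : Int) (out : List Int) : Prop := out = boundedProducts_alt lst L
instance (lst : List (List Int)) (L : Int) (out : List Int) : Decidable (Spec_boundedProducts lst L out) := by unfold Spec_boundedProducts; infer_instance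

-- ===== CLAIM (what is proved, stated in full; the proofs are below) =====
def Claim_equal_boundedProducts : Prop := ∀ (lst : List (List Int)) (L : Int), Dom_boundedProducts lst L → Spec_boundedProducts lst L (boundedProducts lst L)

-- ===== LEMMAS AND PROOFS =====

theorem pvMerge_perm (a b : List Int) : (pvMerge a b).Perm (a ++ b) := by
  induction a generalizing b with
  | nil => simp [pvMerge]
  | cons x xs ih =>
    induction b with
    | nil => simp [pvMerge]
    | cons y ys ihb =>
      simp only [pvMerge]
      split
      · exact (ih (y :: ys)).cons x
      · exact (ihb.cons y).trans List.perm_middle.symm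

theorem pvMerge_sorted {a b : List Int}
    (ha : a.Pairwise (· ≤ ·)) (hb : b.Pairwise (· ≤ ·)) :
    (pvMerge a b).Pairwise (· ≤ ·) := by
  induction a generalizing b with
  | nil => simpa [pvMerge] using hb
  | cons x xs ih =>
    induction b with
    | nil => simpa [pvMerge] using ha
    | cons y ys ihb =>
      rcases List.pairwise_cons.1 ha with ⟨hxle, hxs⟩
      rcases List.pairwise_cons.1 hb with ⟨hyle, hys⟩
      simp only [pvMerge]
      split
      · rename_i hxy
        refine List.pairwise_cons.2 ⟨?_, ih hxs hb⟩
        intro z hz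
        have hz' := (pvMerge_perm xs (y :: ys)).mem_iff.1 hz
        rcases List.mem_append.1 hz' with h | h
        · exact hxle _ h
        · rcases List.mem_cons.1 h with rfl | h
          · exact hxy
          · exact le_trans hxy (hyle _ h)
      · rename_i hxy
        rw [not_le] at hxy
        refine List.pairwise_cons.2 ⟨?_, ihb hys⟩
        intro z hz
        have hz' := (pvMerge_perm (x :: xs) ys).mem_iff.1 hz
        rcases List.mem_append.1 hz' with h | h
        · rcases List.mem_cons.1 h with rfl | h
          · exact le_of_lt hxy
          · exact le_trans (le_of_lt hxy) (hxle _ h)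
        · exact hyle _ h

theorem pvInnerA_eq_takeWhile (L k : Int) (prods : List Int) :
    pvInnerA L k prods = (prods.takeWhile (fun m => decide (¬ k * m > L))).map (fun m => k * m) := by
  induction prods with
  | nil => rfl
  | cons m ms ih =>
    by_cases h : k * m ≤ L
    · simp [pvInnerA, h, ih]
    · simp [pvInnerA, h]

theorem pvRunB_perm (L k : Int) (prods : List Int) :
    (pvRunB L k prods).Perm (pvInnerA L k prods) := by
  rw [pvInnerA_eq_takeWhile]
  unfold pvRunB
  split
  · exact List.reverse_perm _
  · exact List.Perm.refl _

theorem pvRunB_sorted (L k : Int) {prods : List Int}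
    (hp : prods.Pairwise (· ≤ ·)) : (pvRunB L k prods).Pairwise (· ≤ ·) := by
  have htw : (prods.takeWhile (fun m => decide (¬ k * m > L))).Pairwise (· ≤ ·) :=
    hp.sublist (List.takeWhile_sublist _)
  unfold pvRunB
  split
  · rename_i hk
    rw [List.pairwise_reverse, List.pairwise_map]
    exact htw.imp (fun h => mul_le_mul_of_nonpos_left h (le_of_lt hk))
  · rename_i hk
    rw [not_lt] at hk
    rw [List.pairwise_map]
    exact htw.imp (fun h => mul_le_mul_of_nonneg_left h hk)

-- B's inner fold over l: sorted, and a permutation of acc ++ (all of A's new elements)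
theorem pvStepB_fold (L : Int) (prods : List Int) (hp : prods.Pairwise (· ≤ ·)) :
    ∀ (l : List Int) (acc : List Int), acc.Pairwise (· ≤ ·) →
      (l.foldl (fun acc k => pvMerge acc (pvRunB L k prods)) acc).Pairwise (· ≤ ·) ∧
      (l.foldl (fun acc k => pvMerge acc (pvRunB L k prods)) acc).Perm
        (acc ++ l.flatMap (pvInnerA L · prods)) := by
  intro l
  induction l with
  | nil => intro acc hacc; simpa using hacc
  | cons k ks ih =>
    intro acc hacc
    have hm : (pvMerge acc (pvRunB L k prods)).Pairwise (· ≤ ·) :=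
      pvMerge_sorted hacc (pvRunB_sorted L k hp)
    rcases ih (pvMerge acc (pvRunB L k prods)) hm with ⟨hs, hperm⟩
    refine ⟨hs, ?_⟩
    simp only [List.foldl_cons, List.flatMap_cons]
    refine hperm.trans ?_
    have h1 : (pvMerge acc (pvRunB L k prods)).Perm (acc ++ pvInnerA L k prods) :=
      (pvMerge_perm _ _).trans ((pvRunB_perm L k prods).append_left acc)
    calc ((pvMerge acc (pvRunB L k prods)) ++ ks.flatMap (pvInnerA L · prods)).Perm
          ((acc ++ pvInnerA L k prods) ++ ks.flatMap (pvInnerA L · prods)) :=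
            h1.append_right _
      _ = acc ++ (pvInnerA L k prods ++ ks.flatMap (pvInnerA L · prods)) := by
            rw [List.append_assoc]

theorem pvStep_eq (L : Int) (prods l : List Int) (hp : prods.Pairwise (· ≤ ·)) :
    pvStepA L prods l = pvStepB L prods l ∧ (pvStepB L prods l).Pairwise (· ≤ ·) := by
  rcases pvStepB_fold L prods hp l prods hp with ⟨hs, hperm⟩
  constructor
  · unfold pvStepA pvStepB
    rw [PySem.List.foldl_append_eq_flatMap, List.nil_append]
    exact PySem.List.sorted_id_eq_of_perm_of_pairwise _ _ hperm hs
  · exact hs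

-- ===== VERDICT (by name: the statement is the Claim_ definition above) =====
theorem boundedProducts_spec : Claim_equal_boundedProducts := by
  intro lst L _
  unfold Spec_boundedProducts boundedProducts boundedProducts_alt
  have key : ∀ (ls : List (List Int)) (prods : List Int), prods.Pairwise (· ≤ ·) →
      ls.foldl (pvStepA L) prods = ls.foldl (pvStepB L) prods := by
    intro ls
    induction ls with
    | nil => intro prods _; rfl
    | cons l ls ih =>
      intro prods hp
      rcases pvStep_eq L prods l hp with ⟨heq, hs⟩
      simp only [List.foldl_cons, heq]
      exact ih _ hs
  exact key lst [1] (by simp)
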